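-- pv_equiv track=rewrite | github.com/IceTDrinker/AoC2015 | python/11/11.py | validate_seq_and_bigrams
-- ===== SOURCE A (Python) =====
-- def validate_seq_and_bigrams(str_to_val: str) -> bool:
--     has_increasing_sequence = False
--     has_two_bigrams = False
--     pass_is_valid = False
--     bigrams = set()
--     for idx, char in enumerate(str_to_val):
--         if idx < len(str_to_val) - 2:
--             if (
--                 ord(str_to_val[idx + 1]) == ord(char) + 1
--                 and ord(str_to_val[idx + 2]) == ord(char) + 2
--             ):
--                 has_increasing_sequence = True
--
--         if idx < len(str_to_val) - 1:
--             if char == str_to_val[idx + 1]: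
--                 bigrams.add(char * 2)
--
--         has_two_bigrams = len(bigrams) >= 2
--         pass_is_valid = has_increasing_sequence and has_two_bigrams
--
--         if pass_is_valid:
--             break
--
--     return pass_is_valid
-- ===== SOURCE B (Python) =====
-- def validate_seq_and_bigrams(str_to_val: str) -> bool:
--     # Alphabet-driven search: test the 93 possible ascending-triple patterns
--     # ("abc", "bcd", ... over printable ASCII) by substring containment, and
--     # count the distinct characters whose doubling occurs as a substring.
--     has_triple = any(
--         chr(k) + chr(k + 1) + chr(k + 2) in str_to_val
--         for k in range(32, 125)
--     )
--     doubled = {c for c in set(str_to_val) if c + c in str_to_val}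
--     return has_triple and len(doubled) >= 2
-- ===== Notes on version B (the rewrite author's own statement) =====
-- stated objective: alternative
-- what changed: Instead of A's single position-indexed loop with boolean bookkeeping and an early break, B searches over the alphabet: it tests each of the 93 fixed ascending-triple patterns for substring containment and counts distinct characters c whose doubling c+c occurs as a substring.
import Mathlib
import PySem

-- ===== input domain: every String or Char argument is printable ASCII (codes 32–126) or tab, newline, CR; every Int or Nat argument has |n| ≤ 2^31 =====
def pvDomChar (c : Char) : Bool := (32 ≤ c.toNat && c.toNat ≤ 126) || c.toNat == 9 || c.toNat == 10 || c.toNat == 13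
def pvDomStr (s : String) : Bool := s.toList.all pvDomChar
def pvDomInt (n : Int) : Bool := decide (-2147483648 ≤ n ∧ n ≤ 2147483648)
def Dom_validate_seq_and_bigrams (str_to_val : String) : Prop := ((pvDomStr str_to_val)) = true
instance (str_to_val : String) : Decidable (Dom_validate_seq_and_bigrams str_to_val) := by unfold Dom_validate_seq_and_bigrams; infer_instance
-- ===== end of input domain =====

-- B replaces A's position-indexed loop (boolean bookkeeping, early break) by an
-- alphabet-driven search: substring tests against the 93 fixed ascending-triple
-- patterns, and a count of distinct characters whose doubling is a substring.

-- ===== PORT A =====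
-- A's loop over enumerate(str_to_val): index idx, state (has_increasing_sequence,
-- bigrams : set of 2-char strings, pass_is_valid), with the early `break`.
def loopA (l : List Char) (hasInc : Bool) (bigrams : PySem.Set String)
    (passValid : Bool) (idx : Nat) : Bool :=
  if idx < l.length then
    let hasInc' := if idx + 2 < l.length ∧
        (l.getD (idx+1) ' ').toNat = (l.getD idx ' ').toNat + 1 ∧
        (l.getD (idx+2) ' ').toNat = (l.getD idx ' ').toNat + 2 then true else hasInc
    let bigrams' := if idx + 1 < l.length ∧ l.getD idx ' ' = l.getD (idx+1) ' ' then
        PySem.Set.add bigrams (String.ofList [l.getD idx ' ', l.getD idx ' ']) else bigrams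
    let passValid' := hasInc' && decide (2 ≤ bigrams'.length)
    if passValid' then passValid'
    else loopA l hasInc' bigrams' passValid' (idx+1)
  else passValid
termination_by l.length - idx

def validate_seq_and_bigrams (str_to_val : String) : Bool :=
  loopA str_to_val.toList false PySem.Set.empty false 0

-- ===== PORT B =====
-- any(chr(k)+chr(k+1)+chr(k+2) in s for k in range(32,125));
-- {c for c in set(s) if c+c in s}  (only its size is used, so set order is irrelevant)
def validate_seq_and_bigrams_alt (str_to_val : String) : Bool :=
  let hasTriple := (PySem.List.pyRange 32 125 1).any (fun k =>
    PySem.Str.isIn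
      (String.ofList [Char.ofNat k.toNat, Char.ofNat (k.toNat + 1), Char.ofNat (k.toNat + 2)])
      str_to_val)
  let doubled := (PySem.Set.ofList str_to_val.toList).filter (fun c =>
    PySem.Str.isIn (String.ofList [c, c]) str_to_val)
  hasTriple && decide (2 ≤ doubled.length)

-- ===== PRECONDITION & SPEC =====
def Spec_validate_seq_and_bigrams (str_to_val : String) (out : Bool) : Prop := out = validate_seq_and_bigrams_alt str_to_val
instance (str_to_val : String) (out : Bool) : Decidable (Spec_validate_seq_and_bigrams str_to_val out) := by unfold Spec_validate_seq_and_bigrams; infer_instance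

-- ===== CLAIM (what is proved, stated in full; the proofs are below) =====
def Claim_equal_validate_seq_and_bigrams : Prop := ∀ (str_to_val : String), Dom_validate_seq_and_bigrams str_to_val → Spec_validate_seq_and_bigrams str_to_val (validate_seq_and_bigrams str_to_val)

-- ===== LEMMAS AND PROOFS =====

-- A's loop split into its two independent state threads (same step expressions as loopA).
def incA (l : List Char) (b : Bool) (idx : Nat) : Bool :=
  if idx < l.length then
    incA l (if idx + 2 < l.length ∧
        (l.getD (idx+1) ' ').toNat = (l.getD idx ' ').toNat + 1 ∧
        (l.getD (idx+2) ' ').toNat = (l.getD idx ' ').toNat + 2 then true else b) (idx+1)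
  else b
termination_by l.length - idx

def pairsA (l : List Char) (bs : PySem.Set String) (idx : Nat) : PySem.Set String :=
  if idx < l.length then
    pairsA l (if idx + 1 < l.length ∧ l.getD idx ' ' = l.getD (idx+1) ' ' then
      PySem.Set.add bs (String.ofList [l.getD idx ' ', l.getD idx ' ']) else bs) (idx+1)
  else bs
termination_by l.length - idx

-- char-set version of pairsA (a set of characters instead of A's set of strings)
def pairsC (l : List Char) (ps : PySem.Set Char) (idx : Nat) : PySem.Set Char :=
  if idx < l.length then
    pairsC l (if idx + 1 < l.length ∧ l.getD idx ' ' = l.getD (idx+1) ' ' then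
      PySem.Set.add ps (l.getD idx ' ') else ps) (idx+1)
  else ps
termination_by l.length - idx

def dblChr (c : Char) : String := String.ofList [c, c]

lemma incA_stop (l : List Char) (b : Bool) (idx : Nat) (h : ¬ idx < l.length) :
    incA l b idx = b := by rw [incA, if_neg h]

lemma incA_step (l : List Char) (b : Bool) (idx : Nat) (h : idx < l.length) :
    incA l b idx = incA l (if idx + 2 < l.length ∧
        (l.getD (idx+1) ' ').toNat = (l.getD idx ' ').toNat + 1 ∧
        (l.getD (idx+2) ' ').toNat = (l.getD idx ' ').toNat + 2 then true else b) (idx+1) := by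
  rw [incA, if_pos h]

lemma pairsA_stop (l : List Char) (bs : PySem.Set String) (idx : Nat) (h : ¬ idx < l.length) :
    pairsA l bs idx = bs := by rw [pairsA, if_neg h]

lemma pairsA_step (l : List Char) (bs : PySem.Set String) (idx : Nat) (h : idx < l.length) :
    pairsA l bs idx = pairsA l (if idx + 1 < l.length ∧ l.getD idx ' ' = l.getD (idx+1) ' ' then
      PySem.Set.add bs (String.ofList [l.getD idx ' ', l.getD idx ' ']) else bs) (idx+1) := by
  rw [pairsA, if_pos h]

lemma pairsC_stop (l : List Char) (ps : PySem.Set Char) (idx : Nat) (h : ¬ idx < l.length) :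
    pairsC l ps idx = ps := by rw [pairsC, if_neg h]

lemma pairsC_step (l : List Char) (ps : PySem.Set Char) (idx : Nat) (h : idx < l.length) :
    pairsC l ps idx = pairsC l (if idx + 1 < l.length ∧ l.getD idx ' ' = l.getD (idx+1) ' ' then
      PySem.Set.add ps (l.getD idx ' ') else ps) (idx+1) := by
  rw [pairsC, if_pos h]

lemma incA_true (l : List Char) (idx : Nat) : incA l true idx = true := by
  induction hn : l.length - idx generalizing idx with
  | zero => exact incA_stop l true idx (by omega)
  | succ n ih =>
    rw [incA_step l true idx (by omega)]
    split <;> exact ih _ (by omega)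

lemma length_add_ge {α : Type} [BEq α] (s : PySem.Set α) (x : α) :
    s.length ≤ (PySem.Set.add s x).length := by
  unfold PySem.Set.add
  split <;> simp

lemma pairsA_length_mono (l : List Char) (bs : PySem.Set String) (idx : Nat) :
    bs.length ≤ (pairsA l bs idx).length := by
  induction hn : l.length - idx generalizing bs idx with
  | zero => rw [pairsA_stop l bs idx (by omega)]
  | succ n ih =>
    rw [pairsA_step l bs idx (by omega)]
    refine le_trans ?_ (ih _ _ (by omega))
    split
    · exact length_add_ge _ _
    · exact le_rfl

-- main decomposition of A's loop: as long as the break has not fired, the loop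
-- returns "final triple flag && final bigram count ≥ 2".
lemma loopA_eq (l : List Char) (b : Bool) (bs : PySem.Set String) (idx : Nat)
    (h : (b && decide (2 ≤ bs.length)) = false) :
    loopA l b bs false idx = (incA l b idx && decide (2 ≤ (pairsA l bs idx).length)) := by
  induction hn : l.length - idx generalizing b bs idx with
  | zero =>
    rw [loopA, if_neg (by omega), incA_stop l b idx (by omega), pairsA_stop l bs idx (by omega)]
    exact h.symm
  | succ n ih =>
    rw [loopA, if_pos (by omega : idx < l.length),
        incA_step l b idx (by omega), pairsA_step l bs idx (by omega)]
    set b' := if idx + 2 < l.length ∧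
        (l.getD (idx+1) ' ').toNat = (l.getD idx ' ').toNat + 1 ∧
        (l.getD (idx+2) ' ').toNat = (l.getD idx ' ').toNat + 2 then true else b with hb'
    set bs' := if idx + 1 < l.length ∧ l.getD idx ' ' = l.getD (idx+1) ' ' then
        PySem.Set.add bs (String.ofList [l.getD idx ' ', l.getD idx ' ']) else bs with hbs'
    by_cases hpv : (b' && decide (2 ≤ bs'.length)) = true
    · rw [if_pos hpv, hpv]
      have hb1 : b' = true := (Bool.and_eq_true _ _ ▸ hpv).1
      have hcnt : 2 ≤ bs'.length := of_decide_eq_true (Bool.and_eq_true _ _ ▸ hpv).2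
      have hmono := pairsA_length_mono l bs' (idx+1)
      rw [hb1, incA_true]
      have h2 : 2 ≤ (pairsA l bs' (idx+1)).length := by omega
      simp [h2]
    · have hf : (b' && decide (2 ≤ bs'.length)) = false := by simpa using hpv
      rw [if_neg (by simp [hf]), hf]
      exact ih _ _ _ hf (by omega)

-- positional characterisation of incA (exists a triple starting at some i ≥ idx)
lemma incA_eq_true_iff (l : List Char) (idx : Nat) :
    incA l false idx = true ↔ ∃ i, idx ≤ i ∧ i + 2 < l.length ∧
      (l.getD (i+1) ' ').toNat = (l.getD i ' ').toNat + 1 ∧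
      (l.getD (i+2) ' ').toNat = (l.getD i ' ').toNat + 2 := by
  induction hn : l.length - idx generalizing idx with
  | zero =>
    rw [incA_stop l false idx (by omega)]
    constructor
    · intro h; exact absurd h (by simp)
    · rintro ⟨i, h1, h2, _⟩; omega
  | succ n ih =>
    rw [incA_step l false idx (by omega)]
    by_cases hc : idx + 2 < l.length ∧
        (l.getD (idx+1) ' ').toNat = (l.getD idx ' ').toNat + 1 ∧
        (l.getD (idx+2) ' ').toNat = (l.getD idx ' ').toNat + 2
    · rw [if_pos hc, incA_true]
      constructor
      · intro _; exact ⟨idx, le_rfl, hc.1, hc.2.1, hc.2.2⟩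
      · intro _; rfl
    · rw [if_neg hc, ih _ (by omega)]
      constructor
      · rintro ⟨i, h1, hrest⟩; exact ⟨i, by omega, hrest⟩
      · rintro ⟨i, h1, hrest⟩
        refine ⟨i, ?_, hrest⟩
        rcases Nat.eq_or_lt_of_le h1 with heq | hlt
        · exact absurd (heq ▸ hrest) hc
        · omega

-- membership in pairsC: the accumulator, plus every doubled character from idx on
lemma mem_pairsC (l : List Char) (ps : PySem.Set Char) (idx : Nat) (c : Char) :
    c ∈ pairsC l ps idx ↔ c ∈ ps ∨ ∃ i, idx ≤ i ∧ i + 1 < l.length ∧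
      l.getD i ' ' = c ∧ l.getD (i+1) ' ' = c := by
  induction hn : l.length - idx generalizing ps idx with
  | zero =>
    rw [pairsC_stop l ps idx (by omega)]
    constructor
    · intro h; exact Or.inl h
    · rintro (h | ⟨i, h1, h2, _⟩)
      · exact h
      · omega
  | succ n ih =>
    rw [pairsC_step l ps idx (by omega)]
    by_cases hc : idx + 1 < l.length ∧ l.getD idx ' ' = l.getD (idx+1) ' '
    · rw [if_pos hc, ih _ _ (by omega), PySem.Set.mem_add]
      constructor
      · rintro ((h | h) | ⟨i, h1, hrest⟩)
        · exact Or.inl h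
        · exact Or.inr ⟨idx, le_rfl, hc.1, h.symm, hc.2 ▸ h.symm⟩
        · exact Or.inr ⟨i, by omega, hrest⟩
      · rintro (h | ⟨i, h1, h2, h3, h4⟩)
        · exact Or.inl (Or.inl h)
        · rcases Nat.eq_or_lt_of_le h1 with heq | hlt
          · exact Or.inl (Or.inr (heq ▸ h3).symm)
          · exact Or.inr ⟨i, by omega, h2, h3, h4⟩
    · rw [if_neg hc, ih _ _ (by omega)]
      constructor
      · rintro (h | ⟨i, h1, hrest⟩)
        · exact Or.inl h
        · exact Or.inr ⟨i, by omega, hrest⟩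
      · rintro (h | ⟨i, h1, h2, h3, h4⟩)
        · exact Or.inl h
        · rcases Nat.eq_or_lt_of_le h1 with heq | hlt
          · exact absurd ⟨heq ▸ h2, heq ▸ (h3.trans h4.symm)⟩ hc
          · exact Or.inr ⟨i, by omega, h2, h3, h4⟩

lemma nodup_pairsC (l : List Char) (ps : PySem.Set Char) (idx : Nat) (h : ps.Nodup) :
    (pairsC l ps idx).Nodup := by
  induction hn : l.length - idx generalizing ps idx with
  | zero => rw [pairsC_stop l ps idx (by omega)]; exact h
  | succ n ih =>
    rw [pairsC_step l ps idx (by omega)]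
    refine ih _ _ ?_ (by omega)
    split
    · exact PySem.Set.nodup_add _ _ h
    · exact h

lemma dblChr_inj : Function.Injective dblChr := by
  intro a b h
  have := congrArg String.toList h
  simpa [dblChr] using this

lemma map_dbl_add (ps : PySem.Set Char) (c : Char) :
    PySem.Set.add (ps.map dblChr) (dblChr c) = (PySem.Set.add ps c).map dblChr := by
  unfold PySem.Set.add PySem.Set.contains
  by_cases hc : c ∈ ps
  · rw [if_pos (show List.contains (ps.map dblChr) (dblChr c) = true by
        simp only [List.contains_eq_mem, decide_eq_true_eq, List.mem_map]
        exact ⟨c, hc, rfl⟩),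
      if_pos (show List.contains ps c = true by simpa using hc)]
  · rw [if_neg (show ¬ List.contains (ps.map dblChr) (dblChr c) = true by
        simp only [List.contains_eq_mem, decide_eq_true_eq, List.mem_map]
        rintro ⟨d, hd, hdc⟩
        exact hc (dblChr_inj hdc ▸ hd)),
      if_neg (by simpa using hc)]
    simp

lemma pairsA_eq_map (l : List Char) (ps : PySem.Set Char) (idx : Nat) :
    pairsA l (ps.map dblChr) idx = (pairsC l ps idx).map dblChr := by
  induction hn : l.length - idx generalizing ps idx with
  | zero =>
    rw [pairsA_stop l _ idx (by omega), pairsC_stop l ps idx (by omega)]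
  | succ n ih =>
    rw [pairsA_step l _ idx (by omega), pairsC_step l ps idx (by omega)]
    by_cases hc : idx + 1 < l.length ∧ l.getD idx ' ' = l.getD (idx+1) ' '
    · rw [if_pos hc, if_pos hc,
        show String.ofList [l.getD idx ' ', l.getD idx ' '] = dblChr (l.getD idx ' ') from rfl,
        map_dbl_add]
      exact ih _ _ (by omega)
    · rw [if_neg hc, if_neg hc]
      exact ih _ _ (by omega)

-- two characters with equal codepoints are equal
lemma char_eq_of_toNat {a b : Char} (h : a.toNat = b.toNat) : a = b :=
  Char.ext (UInt32.toNat_inj.mp h)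

lemma toNat_ofNat_lt {k : Nat} (h : k < 55296) : (Char.ofNat k).toNat = k := by
  unfold Char.ofNat
  rw [dif_pos (Or.inl (by omega) : Nat.isValidChar k)]
  simp [Char.toNat, Char.ofNatAux]

-- a two-element pattern is a prefix iff the first two entries match
lemma prefix_pair (a b : Char) (t : List Char) :
    [a, b] <+: t ↔ t[0]? = some a ∧ t[1]? = some b := by
  match t with
  | [] => simp
  | [x] => simp [List.cons_prefix_cons]
  | x :: y :: rest => simp [List.cons_prefix_cons, eq_comm]

lemma prefix_triple (a b c : Char) (t : List Char) :
    [a, b, c] <+: t ↔ t[0]? = some a ∧ t[1]? = some b ∧ t[2]? = some c := by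
  match t with
  | [] => simp
  | [x] => simp [List.cons_prefix_cons]
  | [x, y] => simp [List.cons_prefix_cons]
  | x :: y :: z :: rest => simp [List.cons_prefix_cons, eq_comm]

-- substring containment of a two/three-element pattern, positionally
lemma isIn_pair_iff (c : Char) (l : List Char) :
    PySem.Chars.isIn [c, c] l = true ↔ ∃ i, l[i]? = some c ∧ l[i+1]? = some c := by
  rw [← PySem.Chars.exists_prefix_drop_iff_isIn]
  constructor
  · rintro ⟨j, hp⟩
    rw [prefix_pair] at hp
    exact ⟨j, by simpa [List.getElem?_drop] using hp.1, by simpa [List.getElem?_drop] using hp.2⟩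
  · rintro ⟨i, h0, h1⟩
    refine ⟨i, (prefix_pair _ _ _).mpr ⟨?_, ?_⟩⟩
    · simpa [List.getElem?_drop] using h0
    · simpa [List.getElem?_drop] using h1

lemma isIn_triple_iff (a b c : Char) (l : List Char) :
    PySem.Chars.isIn [a, b, c] l = true ↔
      ∃ i, l[i]? = some a ∧ l[i+1]? = some b ∧ l[i+2]? = some c := by
  rw [← PySem.Chars.exists_prefix_drop_iff_isIn]
  constructor
  · rintro ⟨j, hp⟩
    rw [prefix_triple] at hp
    exact ⟨j, by simpa [List.getElem?_drop] using hp.1,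
      by simpa [List.getElem?_drop] using hp.2.1,
      by simpa [List.getElem?_drop] using hp.2.2⟩
  · rintro ⟨i, h0, h1, h2⟩
    refine ⟨i, (prefix_triple _ _ _ _).mpr ⟨?_, ?_, ?_⟩⟩
    · simpa [List.getElem?_drop] using h0
    · simpa [List.getElem?_drop] using h1
    · simpa [List.getElem?_drop] using h2

-- Dom: every character of l is printable ASCII or tab/newline/CR
lemma dom_mem (l : List Char) (h : l.all pvDomChar = true) (c : Char) (hc : c ∈ l) :
    (32 ≤ c.toNat ∧ c.toNat ≤ 126) ∨ c.toNat = 9 ∨ c.toNat = 10 ∨ c.toNat = 13 := by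
  have := List.all_eq_true.mp h c hc
  simp [pvDomChar] at this
  omega

-- the triple flag equals B's alphabet scan, on Dom
lemma triple_eq (l : List Char) (hdom : l.all pvDomChar = true) :
    incA l false 0 = (PySem.List.pyRange 32 125 1).any (fun k =>
      PySem.Chars.isIn [Char.ofNat k.toNat, Char.ofNat (k.toNat + 1), Char.ofNat (k.toNat + 2)] l) := by
  rw [Bool.eq_iff_iff, incA_eq_true_iff, List.any_eq_true]
  constructor
  · rintro ⟨i, _, hlen, h1, h2⟩
    have hi : i < l.length := by omega
    have hi1 : i + 1 < l.length := by omega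
    have hi2 : i + 2 < l.length := by omega
    set a := l.getD i ' ' with ha
    set b := l.getD (i+1) ' ' with hb
    set c := l.getD (i+2) ' ' with hcv
    have hma : a ∈ l := by rw [ha, List.getD_eq_getElem l ' ' hi]; exact List.getElem_mem hi
    have hmb : b ∈ l := by rw [hb, List.getD_eq_getElem l ' ' hi1]; exact List.getElem_mem hi1
    have hmc : c ∈ l := by rw [hcv, List.getD_eq_getElem l ' ' hi2]; exact List.getElem_mem hi2
    have da := dom_mem l hdom a hma
    have db := dom_mem l hdom b hmb
    have dc := dom_mem l hdom c hmc
    have hrange : 32 ≤ a.toNat ∧ a.toNat ≤ 124 := by omega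
    refine ⟨(a.toNat : Int), ?_, ?_⟩
    · rw [PySem.List.mem_pyRange_one]; omega
    · rw [isIn_triple_iff]
      have hk : ((a.toNat : Int)).toNat = a.toNat := Int.toNat_natCast _
      refine ⟨i, ?_, ?_, ?_⟩
      · rw [List.getElem?_eq_getElem hi, ← List.getD_eq_getElem l ' ' hi, ← ha]
        congr 1
        rw [hk, Char.ofNat_toNat]
      · rw [List.getElem?_eq_getElem hi1, ← List.getD_eq_getElem l ' ' hi1, ← hb]
        congr 1
        refine char_eq_of_toNat ?_
        rw [toNat_ofNat_lt (by omega), hk]; omega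
      · rw [List.getElem?_eq_getElem hi2, ← List.getD_eq_getElem l ' ' hi2, ← hcv]
        congr 1
        refine char_eq_of_toNat ?_
        rw [toNat_ofNat_lt (by omega), hk]; omega
  · rintro ⟨k, hk, hin⟩
    rw [PySem.List.mem_pyRange_one] at hk
    rw [isIn_triple_iff] at hin
    obtain ⟨i, h0, h1, h2⟩ := hin
    have hkn : k.toNat < 55293 := by omega
    obtain ⟨hlt2, e2⟩ := List.getElem?_eq_some_iff.mp h2
    obtain ⟨hlt1, e1⟩ := List.getElem?_eq_some_iff.mp h1
    obtain ⟨hlt0, e0⟩ := List.getElem?_eq_some_iff.mp h0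
    refine ⟨i, Nat.zero_le _, hlt2, ?_, ?_⟩
    · rw [List.getD_eq_getElem l ' ' hlt1, List.getD_eq_getElem l ' ' hlt0, e0, e1,
        toNat_ofNat_lt (by omega), toNat_ofNat_lt (by omega)]
    · rw [List.getD_eq_getElem l ' ' hlt2, List.getD_eq_getElem l ' ' hlt0, e0, e2,
        toNat_ofNat_lt (by omega), toNat_ofNat_lt (by omega)]

-- the distinct doubled characters collected by A's loop are exactly B's filtered set
lemma doubled_length_eq (l : List Char) :
    (pairsC l PySem.Set.empty 0).length =
    ((PySem.Set.ofList l).filter (fun c => PySem.Chars.isIn [c, c] l)).length := by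
  refine List.Perm.length_eq ?_
  refine (List.perm_ext_iff_of_nodup
    (nodup_pairsC l PySem.Set.empty 0 (by simp [PySem.Set.empty]))
    ((PySem.Set.nodup_ofList l).filter _)).mpr ?_
  intro c
  rw [mem_pairsC, List.mem_filter, PySem.Set.mem_ofList, isIn_pair_iff]
  constructor
  · rintro (h | ⟨i, _, hlen, h1, h2⟩)
    · simp [PySem.Set.empty] at h
    · have hi : i < l.length := by omega
      refine ⟨by rw [← h1, List.getD_eq_getElem l ' ' hi]; exact List.getElem_mem hi, ?_⟩
      exact ⟨i, by rw [List.getElem?_eq_getElem hi, ← List.getD_eq_getElem l ' ' hi, h1],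
        by rw [List.getElem?_eq_getElem (by omega : i + 1 < l.length),
               ← List.getD_eq_getElem l ' ' (by omega : i + 1 < l.length), h2]⟩
  · rintro ⟨_, hp⟩
    obtain ⟨i, h0, h1⟩ := hp
    obtain ⟨hlt1, e1⟩ := List.getElem?_eq_some_iff.mp h1
    obtain ⟨hlt0, e0⟩ := List.getElem?_eq_some_iff.mp h0
    exact Or.inr ⟨i, Nat.zero_le _, hlt1, by rw [List.getD_eq_getElem l ' ' hlt0, e0],
      by rw [List.getD_eq_getElem l ' ' hlt1, e1]⟩

-- ===== VERDICT (by name: the statement is the Claim_ definition above) =====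
theorem validate_seq_and_bigrams_spec : Claim_equal_validate_seq_and_bigrams := by
  intro s hdom
  unfold Spec_validate_seq_and_bigrams validate_seq_and_bigrams validate_seq_and_bigrams_alt
  rw [loopA_eq _ _ _ _ (by simp [PySem.Set.empty])]
  rw [show (PySem.Set.empty : PySem.Set String) =
    (PySem.Set.empty : PySem.Set Char).map dblChr from rfl]
  rw [pairsA_eq_map, List.length_map]
  have hdom' : s.toList.all pvDomChar = true := hdom
  rw [triple_eq s.toList hdom', doubled_length_eq]
  simp
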